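-- pv_equiv track=rewrite | github.com/Garrison-zx/class_scene_gen | video_generation/pipeline/scene_generator.py | _is_likely_complete_tsx
-- ===== SOURCE A (Python) =====
-- def _is_likely_complete_tsx(code: str) -> bool:
--     """粗粒度校验，过滤明显截断代码。"""
--     stripped = code.strip()
--     if not stripped:
--         return False
--     if "export" not in stripped:
--         return False
--
--     # 明显未结束的尾部模式
--     bad_suffixes = ("=", "=>", "(", "{", "[", "<", ",", ":", ".", "from")
--     if stripped.endswith(bad_suffixes):
--         return False
--
--     # 基础括号配平检查（不追求语法完整，只过滤明显半截）
--     pairs = [("(", ")"), ("{", "}"), ("[", "]")]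
--     for left, right in pairs:
--         if stripped.count(left) != stripped.count(right):
--             return False
--
--     return True
-- ===== SOURCE B (Python) =====
-- def _is_likely_complete_tsx(code: str) -> bool:
--     stripped = code.strip()
--     if not stripped:
--         return False
--     if "export" not in stripped:
--         return False
--     bad_suffixes = ("=", "=>", "(", "{", "[", "<", ",", ":", ".", "from")
--     if stripped.endswith(bad_suffixes):
--         return False
--     # one pass: signed running balance per bracket kind instead of six count() scans
--     paren = brace = bracket = 0
--     for ch in stripped:
--         if ch == '(':
--             paren += 1
--         elif ch == ')':
--             paren -= 1
--         elif ch == '{':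
--             brace += 1
--         elif ch == '}':
--             brace -= 1
--         elif ch == '[':
--             bracket += 1
--         elif ch == ']':
--             bracket -= 1
--     return paren == 0 and brace == 0 and bracket == 0
-- ===== Notes on version B (the rewrite author's own statement) =====
-- stated objective: alternative
-- what changed: Replaces the six separate str.count scans (two per bracket pair, driven by a pairs loop) with a single pass over the stripped string that maintains one signed balance per bracket kind and checks all three are zero at the end.
import Mathlib
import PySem

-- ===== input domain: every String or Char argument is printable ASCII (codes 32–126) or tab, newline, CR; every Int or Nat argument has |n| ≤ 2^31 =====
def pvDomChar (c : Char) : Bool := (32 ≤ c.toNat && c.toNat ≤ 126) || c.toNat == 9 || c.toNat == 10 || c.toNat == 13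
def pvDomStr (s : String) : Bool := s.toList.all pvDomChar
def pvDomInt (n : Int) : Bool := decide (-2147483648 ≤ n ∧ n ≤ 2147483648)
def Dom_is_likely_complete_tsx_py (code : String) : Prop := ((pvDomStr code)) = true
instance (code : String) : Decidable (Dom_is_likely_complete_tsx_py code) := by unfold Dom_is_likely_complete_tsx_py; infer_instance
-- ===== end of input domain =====

-- B replaces A's six str.count scans (over a pairs loop) by ONE pass keeping a signed
-- balance per bracket kind; the guards (strip/empty/"export"/bad suffixes) are unchanged.

-- ===== PORT A =====
-- A's `for left, right in pairs:` loop with its early `return False`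
def pvPairsLoop (stripped : String) : List (String × String) → Bool
  | [] => true
  | (left, right) :: rest =>
      if PySem.Str.count stripped left ≠ PySem.Str.count stripped right then false
      else pvPairsLoop stripped rest

def is_likely_complete_tsx_py (code : String) : Bool :=
  let stripped := PySem.Str.strip code
  if stripped = "" then false
  else if ¬ (PySem.Str.isIn "export" stripped) then false
  else
    let bad_suffixes : List String := ["=", "=>", "(", "{", "[", "<", ",", ":", ".", "from"]
    if bad_suffixes.any (fun suf => PySem.Str.endswith stripped suf) then false
    else
      let pairs : List (String × String) := [("(", ")"), ("{", "}"), ("[", "]")]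
      pvPairsLoop stripped pairs

-- ===== PORT B =====
-- one step of Source B's single pass: update the three signed balances
def pvBalStep (acc : Int × Int × Int) (ch : Char) : Int × Int × Int :=
  if ch == '(' then (acc.1 + 1, acc.2.1, acc.2.2)
  else if ch == ')' then (acc.1 - 1, acc.2.1, acc.2.2)
  else if ch == '{' then (acc.1, acc.2.1 + 1, acc.2.2)
  else if ch == '}' then (acc.1, acc.2.1 - 1, acc.2.2)
  else if ch == '[' then (acc.1, acc.2.1, acc.2.2 + 1)
  else if ch == ']' then (acc.1, acc.2.1, acc.2.2 - 1)
  else acc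

def is_likely_complete_tsx_py_alt (code : String) : Bool :=
  let stripped := PySem.Str.strip code
  if stripped = "" then false
  else if ¬ (PySem.Str.isIn "export" stripped) then false
  else
    let bad_suffixes : List String := ["=", "=>", "(", "{", "[", "<", ",", ":", ".", "from"]
    if bad_suffixes.any (fun suf => PySem.Str.endswith stripped suf) then false
    else
      let bal := stripped.toList.foldl pvBalStep (0, 0, 0)
      bal.1 == 0 && bal.2.1 == 0 && bal.2.2 == 0

-- ===== PRECONDITION & SPEC =====
def Spec_is_likely_complete_tsx_py (code : String) (out : Bool) : Prop := out = is_likely_complete_tsx_py_alt code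
instance (code : String) (out : Bool) : Decidable (Spec_is_likely_complete_tsx_py code out) := by unfold Spec_is_likely_complete_tsx_py; infer_instance

-- ===== CLAIM (what is proved, stated in full; the proofs are below) =====
def Claim_equal_is_likely_complete_tsx_py : Prop := ∀ (code : String), Dom_is_likely_complete_tsx_py code → Spec_is_likely_complete_tsx_py code (is_likely_complete_tsx_py code)

-- ===== LEMMAS AND PROOFS =====

-- Python str.count with a single-character needle counts that character
lemma chars_count_go_singleton (c : Char) : ∀ (fuel : Nat) (l : List Char) (acc : Nat),
    l.length ≤ fuel → PySem.Chars.count.go [c] fuel l acc = acc + l.count c := by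
  intro fuel
  induction fuel with
  | zero => intro l acc h; cases l with
    | nil => simp [PySem.Chars.count.go]
    | cons a t => simp at h
  | succ n ih =>
    intro l acc h
    cases l with
    | nil => simp [PySem.Chars.count.go]
    | cons a t =>
      simp only [PySem.Chars.count.go, List.isPrefixOf]
      by_cases hc : c == a
      · have : c = a := by simpa using hc
        subst this
        rw [if_pos (by simp)]
        have hd : List.drop [c].length (c :: t) = t := rfl
        rw [hd, ih t (acc + 1) (by simpa using Nat.le_of_succ_le_succ h)]
        simp
        omega
      · rw [if_neg (by simpa using hc)]
        rw [ih t acc (by simpa using Nat.le_of_succ_le_succ h)]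
        have : ¬ (a = c) := fun h' => hc (by simp [h'])
        simp [this]

lemma str_count_singleton (s t : String) (c : Char) (ht : t.toList = [c]) :
    PySem.Str.count s t = s.toList.count c := by
  rw [PySem.Str.count_eq, ht]
  unfold PySem.Chars.count
  rw [if_neg (by simp)]
  rw [chars_count_go_singleton c s.toList.length s.toList 0 le_rfl]
  simp

-- invariant of B's single pass
lemma bal_spec (l : List Char) (a b c : Int) :
    l.foldl pvBalStep (a, b, c) =
      (a + l.count '(' - l.count ')',
       b + l.count '{' - l.count '}',
       c + l.count '[' - l.count ']') := by
  induction l generalizing a b c with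
  | nil => simp
  | cons ch t ih =>
    simp only [List.foldl_cons]
    by_cases h1 : ch = '('
    · rw [show pvBalStep (a, b, c) ch = (a + 1, b, c) by simp [pvBalStep, h1], ih]
      simp [Prod.ext_iff, List.count_cons, h1]
      all_goals omega
    by_cases h2 : ch = ')'
    · rw [show pvBalStep (a, b, c) ch = (a - 1, b, c) by simp [pvBalStep, h1, h2], ih]
      simp [Prod.ext_iff, List.count_cons, h1, h2]
      all_goals omega
    by_cases h3 : ch = '{'
    · rw [show pvBalStep (a, b, c) ch = (a, b + 1, c) by simp [pvBalStep, h1, h2, h3], ih]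
      simp [Prod.ext_iff, List.count_cons, h1, h2, h3]
      all_goals omega
    by_cases h4 : ch = '}'
    · rw [show pvBalStep (a, b, c) ch = (a, b - 1, c) by simp [pvBalStep, h1, h2, h3, h4], ih]
      simp [Prod.ext_iff, List.count_cons, h1, h2, h3, h4]
      all_goals omega
    by_cases h5 : ch = '['
    · rw [show pvBalStep (a, b, c) ch = (a, b, c + 1) by simp [pvBalStep, h1, h2, h3, h4, h5], ih]
      simp [Prod.ext_iff, List.count_cons, h1, h2, h3, h4, h5]
      all_goals omega
    by_cases h6 : ch = ']'
    · rw [show pvBalStep (a, b, c) ch = (a, b, c - 1) by simp [pvBalStep, h1, h2, h3, h4, h5, h6], ih]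
      simp [Prod.ext_iff, List.count_cons, h1, h2, h3, h4, h5, h6]
      all_goals omega
    · rw [show pvBalStep (a, b, c) ch = (a, b, c) by simp [pvBalStep, h1, h2, h3, h4, h5, h6], ih]
      simp [h1, h2, h3, h4, h5, h6]

-- ===== VERDICT (by name: the statement is the Claim_ definition above) =====
set_option maxHeartbeats 2000000 in
theorem is_likely_complete_tsx_py_spec : Claim_equal_is_likely_complete_tsx_py := by
  intro code _
  unfold Spec_is_likely_complete_tsx_py is_likely_complete_tsx_py is_likely_complete_tsx_py_alt
  dsimp only
  split_ifs with h1 h2 h3 <;> try exact Eq.refl false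
  simp only [pvPairsLoop, bal_spec,
    str_count_singleton _ "(" '(' rfl, str_count_singleton _ ")" ')' rfl,
    str_count_singleton _ "{" '{' rfl, str_count_singleton _ "}" '}' rfl,
    str_count_singleton _ "[" '[' rfl, str_count_singleton _ "]" ']' rfl]
  split_ifs with q1 q2 q3 <;> simp_all <;> omega
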